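-- pv_equiv track=rewrite | github.com/vrrohan/Topcoder | easy/day12/srm689/similaruserdetection.py | haveSimilar
-- ===== SOURCE A (Python) =====
-- def checkHandleContent(handleOne, handleTwo) :
--     isHandleContentSimilar = True
--     for i in range(len(handleOne)) :
--         if ((handleOne[i] == 'O' and handleTwo[i] == '0') or (handleOne[i] == '0' and handleTwo[i] == 'O') or (handleOne[i] == '1' and (handleTwo[i] == 'l' or handleTwo[i] == 'I')) or (handleOne[i] == 'l' and (handleTwo[i] == '1' or handleTwo[i] == 'I')) or (handleOne[i] == 'I' and (handleTwo[i] == '1' or handleTwo[i] == 'l')) or (handleOne[i] == handleTwo[i])) :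
--             isHandleContentSimilar = True
--         else :
--             isHandleContentSimilar = False
--             break
--     return isHandleContentSimilar
--
-- def haveSimilar(handles) :
--     similarHandles = "Similar handles not found"
--     for i in range(len(handles)-1) :
--         for j in range(i+1, len(handles)) :
--             #If both handles contains same content
--             if handles[i]==handles[j] :
--                 similarHandles = "Similar handles found"
--                 break
--             elif len(handles[i])==len(handles[j]) :
--                 if(checkHandleContent(handles[i], handles[j])) :
--                     similarHandles = "Similar handles found"
--                     break
--         if similarHandles=="Similar handles found" :
--             break
--     return similarHandles
-- ===== SOURCE B (Python) =====
-- _TABLE = str.maketrans("O0lI1", "00111")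
--
-- def haveSimilar(handles):
--     seen = set()
--     for h in handles:
--         c = h.translate(_TABLE)
--         if c in seen:
--             return "Similar handles found"
--         seen.add(c)
--     return "Similar handles not found"
-- ===== Notes on version B (the rewrite author's own statement) =====
-- stated objective: faster
-- what changed: Replaces the nested pairwise scan (comparing every pair of handles character by character) with a single pass that canonicalizes each handle (O/0 -> 0, 1/l/I -> 1) and checks for a collision in a set of canonical forms.
import Mathlib
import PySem

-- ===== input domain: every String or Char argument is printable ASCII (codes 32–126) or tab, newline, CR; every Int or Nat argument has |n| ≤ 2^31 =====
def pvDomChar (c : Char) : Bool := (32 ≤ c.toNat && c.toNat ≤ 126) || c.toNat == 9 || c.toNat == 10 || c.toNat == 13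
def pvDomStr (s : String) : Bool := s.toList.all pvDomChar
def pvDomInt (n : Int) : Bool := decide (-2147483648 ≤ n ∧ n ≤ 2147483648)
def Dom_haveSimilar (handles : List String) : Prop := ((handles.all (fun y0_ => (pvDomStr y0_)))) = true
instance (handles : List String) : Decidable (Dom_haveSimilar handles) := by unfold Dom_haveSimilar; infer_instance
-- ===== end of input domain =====

-- B replaces A's nested O(n^2*L) pairwise character scan by a single canonicalize-and-dedup pass (objective: faster).

-- ===== PORT A =====
-- the big positional-similarity disjunction of checkHandleContent, branch order kept
def pvSimChar (c1 c2 : Char) : Bool :=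
  (c1 == 'O' && c2 == '0') || (c1 == '0' && c2 == 'O') ||
  (c1 == '1' && (c2 == 'l' || c2 == 'I')) ||
  (c1 == 'l' && (c2 == '1' || c2 == 'I')) ||
  (c1 == 'I' && (c2 == '1' || c2 == 'l')) ||
  (c1 == c2)

-- the for-i loop with break; the (_::_, []) case is where Python would raise IndexError,
-- unreachable here because haveSimilar only calls it with equal lengths
def checkHandleContent : List Char → List Char → Bool
  | [], _ => true
  | c1 :: t1, c2 :: t2 => if pvSimChar c1 c2 then checkHandleContent t1 t2 else false
  | _ :: _, [] => false

-- inner for-j loop carrying the similarHandles string, with break on "found"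
def hsInner (h : List Char) (rest : List (List Char)) (s : String) : String :=
  match rest with
  | [] => s
  | hj :: t =>
    if h == hj then "Similar handles found"
    else if h.length == hj.length then
      if checkHandleContent h hj then "Similar handles found" else hsInner h t s
    else hsInner h t s

-- outer for-i loop, breaking when the inner loop set the "found" string
def hsOuter (hs : List (List Char)) (s : String) : String :=
  match hs with
  | [] => s
  | h :: t =>
    let s' := hsInner h t s
    if s' == "Similar handles found" then s' else hsOuter t s'

def haveSimilar (handles : List String) : String :=
  hsOuter (handles.map String.toList) "Similar handles not found"

-- ===== PORT B =====
-- str.translate with the O0lI1 -> 00111 table, per character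
def pvCanonChar (c : Char) : Char :=
  if c == 'O' || c == '0' then '0'
  else if c == '1' || c == 'l' || c == 'I' then '1'
  else c

-- the for-h loop of Source B with its early return and the growing 'seen' set
def altLoop : List String → PySem.Set (List Char) → String
  | [], _ => "Similar handles not found"
  | h :: t, seen =>
    let c := h.toList.map pvCanonChar
    if PySem.Set.contains seen c then "Similar handles found"
    else altLoop t (PySem.Set.add seen c)

def haveSimilar_alt (handles : List String) : String :=
  altLoop handles PySem.Set.empty

-- ===== PRECONDITION & SPEC =====
def Spec_haveSimilar (handles : List String) (out : String) : Prop := out = haveSimilar_alt handles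
instance (handles : List String) (out : String) : Decidable (Spec_haveSimilar handles out) := by unfold Spec_haveSimilar; infer_instance

-- ===== CLAIM (what is proved, stated in full; the proofs are below) =====
def Claim_equal_haveSimilar : Prop := ∀ (handles : List String), Dom_haveSimilar handles → Spec_haveSimilar handles (haveSimilar handles)

-- ===== LEMMAS AND PROOFS =====

set_option maxRecDepth 8192 in
theorem simChar_iff (c1 c2 : Char) : pvSimChar c1 c2 = true ↔ pvCanonChar c1 = pvCanonChar c2 := by
  unfold pvSimChar pvCanonChar
  simp only [Bool.or_eq_true, Bool.and_eq_true, beq_iff_eq]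
  by_cases h1 : c1 = 'O' <;> by_cases h2 : c1 = '0' <;> by_cases h3 : c1 = '1' <;>
    by_cases h4 : c1 = 'l' <;> by_cases h5 : c1 = 'I' <;>
    by_cases g1 : c2 = 'O' <;> by_cases g2 : c2 = '0' <;> by_cases g3 : c2 = '1' <;>
    by_cases g4 : c2 = 'l' <;> by_cases g5 : c2 = 'I' <;>
    simp_all [eq_comm]

theorem check_iff (l1 l2 : List Char) (h : l1.length = l2.length) :
    checkHandleContent l1 l2 = true ↔ l1.map pvCanonChar = l2.map pvCanonChar := by
  induction l1 generalizing l2 with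
  | nil =>
    cases l2 with
    | nil => simp [checkHandleContent]
    | cons c2 t2 => simp at h
  | cons c1 t1 ih =>
    cases l2 with
    | nil => simp at h
    | cons c2 t2 =>
      simp only [List.length_cons, Nat.add_right_cancel_iff] at h
      simp only [checkHandleContent, List.map_cons, List.cons.injEq]
      by_cases hc : pvCanonChar c1 = pvCanonChar c2
      · simp [(simChar_iff c1 c2).2 hc, hc, ih t2 h]
      · have hs : pvSimChar c1 c2 = false := by
          cases hv : pvSimChar c1 c2
          · rfl
          · exact absurd ((simChar_iff c1 c2).1 hv) hc
        simp [hs, hc]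

theorem inner_eq (h : List Char) (rest : List (List Char)) :
    hsInner h rest "Similar handles not found" =
      (if h.map pvCanonChar ∈ rest.map (List.map pvCanonChar)
       then "Similar handles found" else "Similar handles not found") := by
  induction rest with
  | nil => simp [hsInner]
  | cons hj t ih =>
    by_cases he : h = hj
    · subst he; simp [hsInner]
    · by_cases hl : h.length = hj.length
      · by_cases hcc : h.map pvCanonChar = hj.map pvCanonChar
        · simp [hsInner, he, hl, (check_iff h hj hl).2 hcc, hcc]
        · have : checkHandleContent h hj = false := by
            cases hcv : checkHandleContent h hj
            · rfl
            · exact absurd ((check_iff h hj hl).1 hcv) hcc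
          simp [hsInner, he, hl, this, ih, hcc]
      · have hcc : ¬ h.map pvCanonChar = hj.map pvCanonChar := by
          intro hx
          exact hl (by simpa using congrArg List.length hx)
        simp [hsInner, he, hl, ih, hcc]

theorem outer_eq (hs : List (List Char)) :
    hsOuter hs "Similar handles not found" =
      (if (hs.map (List.map pvCanonChar)).Nodup
       then "Similar handles not found" else "Similar handles found") := by
  induction hs with
  | nil => simp [hsOuter]
  | cons h t ih =>
    simp only [hsOuter, inner_eq]
    by_cases hm : h.map pvCanonChar ∈ t.map (List.map pvCanonChar)
    · simp [hm, List.nodup_cons]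
    · simp [hm, ih, List.nodup_cons]

theorem altLoop_eq (hs : List String) (seen : PySem.Set (List Char)) :
    altLoop hs seen =
      (if (∃ h ∈ hs, h.toList.map pvCanonChar ∈ seen) ∨
          ¬ (hs.map (fun h => h.toList.map pvCanonChar)).Nodup
       then "Similar handles found" else "Similar handles not found") := by
  induction hs generalizing seen with
  | nil => simp [altLoop]
  | cons h t ih =>
    by_cases hm : h.toList.map pvCanonChar ∈ seen
    · have hc : PySem.Set.contains seen (h.toList.map pvCanonChar) = true :=
        (PySem.Set.contains_iff seen _).2 hm
      simp [altLoop, hm]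
    · have hc : PySem.Set.contains seen (h.toList.map pvCanonChar) = false := by
        cases hv : PySem.Set.contains seen (h.toList.map pvCanonChar)
        · rfl
        · exact absurd ((PySem.Set.contains_iff seen _).1 hv) hm
      simp only [altLoop, hc, Bool.false_eq_true, if_false]
      rw [ih]
      refine if_congr ?_ rfl rfl
      simp only [List.map_cons, List.nodup_cons, List.mem_cons, PySem.Set.mem_add]
      constructor
      · rintro (⟨a, ha, hin | heq⟩ | hnd)
        · exact Or.inl ⟨a, Or.inr ha, hin⟩
        · exact Or.inr fun ⟨hn, _⟩ => hn (List.mem_map.2 ⟨a, ha, heq⟩)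
        · exact Or.inr fun ⟨_, hn⟩ => hnd hn
      · rintro (⟨a, rfl | ha, hin⟩ | hnd)
        · exact absurd hin hm
        · exact Or.inl ⟨a, ha, Or.inl hin⟩
        · by_cases hmem : h.toList.map pvCanonChar ∈ t.map (fun x => x.toList.map pvCanonChar)
          · obtain ⟨a, ha, heq⟩ := List.mem_map.1 hmem
            exact Or.inl ⟨a, ha, Or.inr heq⟩
          · exact Or.inr fun hn => hnd ⟨hmem, hn⟩

-- ===== VERDICT (by name: the statement is the Claim_ definition above) =====
theorem haveSimilar_spec : Claim_equal_haveSimilar := by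
  intro handles _
  unfold Spec_haveSimilar haveSimilar haveSimilar_alt
  rw [outer_eq, altLoop_eq]
  simp only [PySem.Set.empty, List.not_mem_nil,
    List.map_map]
  by_cases hn : (handles.map (fun h => h.toList.map pvCanonChar)).Nodup
  · simp only [Function.comp_def] at *
    simp [hn]
  · simp only [Function.comp_def] at *
    simp [hn]
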